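-- pv_equiv track=rewrite | github.com/lMoonHawk/AoC-py | 2020/day_20.py | transform
-- ===== SOURCE A (Python) =====
-- def transform(tile: dict, size, rot: int, flip: int) -> dict:
--     for _ in range(rot):
--         tile = {(y, size - 1 - x): sq for (x, y), sq in tile.items()}
--
--     if flip in [1, 3]:
--         tile = {(x, size - 1 - y): sq for (x, y), sq in tile.items()}
--     if flip in [2, 3]:
--         tile = {(size - 1 - x, y): sq for (x, y), sq in tile.items()}
--     return tile
-- ===== SOURCE B (Python) =====
-- def transform(tile: dict, size, rot: int, flip: int) -> dict:
--     # One pass: closed-form rotation by r = max(rot,0) % 4, then the two flips, per key.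
--     r = max(rot, 0) % 4
--     s = size - 1
--     rotate = {0: lambda x, y: (x, y),
--               1: lambda x, y: (y, s - x),
--               2: lambda x, y: (s - x, s - y),
--               3: lambda x, y: (s - y, x)}[r]
--     fy = flip in (1, 3)
--     fx = flip in (2, 3)
--     out = {}
--     for (x, y), sq in tile.items():
--         x, y = rotate(x, y)
--         out[(s - x if fx else x, s - y if fy else y)] = sq
--     return out
-- ===== Notes on version B (the rewrite author's own statement) =====
-- stated objective: faster
-- what changed: Replaces the rot-fold of repeated dict rebuilds with one pass that maps each key through a closed-form rotation (r = max(rot,0) % 4) composed with the two flips.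
import Mathlib
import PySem

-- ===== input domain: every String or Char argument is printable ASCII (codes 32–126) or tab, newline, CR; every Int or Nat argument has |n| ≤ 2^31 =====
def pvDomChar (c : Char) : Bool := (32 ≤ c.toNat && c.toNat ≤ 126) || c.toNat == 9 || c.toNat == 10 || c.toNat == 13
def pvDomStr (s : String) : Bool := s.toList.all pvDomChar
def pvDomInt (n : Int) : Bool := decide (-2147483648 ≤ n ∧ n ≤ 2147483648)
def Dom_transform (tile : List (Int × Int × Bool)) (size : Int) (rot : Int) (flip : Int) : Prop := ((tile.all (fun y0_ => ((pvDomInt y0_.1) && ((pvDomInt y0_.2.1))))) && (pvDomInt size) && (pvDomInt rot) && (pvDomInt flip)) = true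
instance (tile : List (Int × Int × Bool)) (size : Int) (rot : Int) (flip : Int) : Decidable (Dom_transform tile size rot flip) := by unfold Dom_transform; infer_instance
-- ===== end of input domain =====

-- B replaces A's rotation loop (rot successive dict rebuilds) with one closed-form map per key;
-- objective: simpler/faster single pass. Dicts are association lists with distinct keys (Pre_).

-- ===== PORT A =====
-- the rotation dict comprehension {(y, size-1-x): sq …} applied to one entry; the key map is
-- injective, so on a duplicate-free association list the comprehension is exactly a map of this
def pvRotPt (size : Int) (p : Int × Int × Bool) : Int × Int × Bool :=
  (p.2.1, size - 1 - p.1, p.2.2)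

def transform (tile : List (Int × Int × Bool)) (size : Int) (rot : Int) (flip : Int) : List (Int × Int × Bool) :=
  let t1 := (PySem.List.pyRange 0 rot 1).foldl (fun acc _ => acc.map (pvRotPt size)) tile
  let t2 := if flip = 1 ∨ flip = 3 then t1.map (fun p => (p.1, size - 1 - p.2.1, p.2.2)) else t1
  if flip = 2 ∨ flip = 3 then t2.map (fun p => (size - 1 - p.1, p.2.1, p.2.2)) else t2

-- ===== PORT B =====
def transform_alt (tile : List (Int × Int × Bool)) (size : Int) (rot : Int) (flip : Int) : List (Int × Int × Bool) :=
  let r := PySem.Int.mod (max rot 0) 4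
  let s := size - 1
  tile.map (fun p =>
    let xy : Int × Int :=
      if r = 1 then (p.2.1, s - p.1)
      else if r = 2 then (s - p.1, s - p.2.1)
      else if r = 3 then (s - p.2.1, p.1)
      else (p.1, p.2.1)
    ((if flip = 2 ∨ flip = 3 then s - xy.1 else xy.1),
     (if flip = 1 ∨ flip = 3 then s - xy.2 else xy.2), p.2.2))

-- ===== PRECONDITION & SPEC =====
-- Pre_ only demands that the association list is a valid dict encoding: pairwise distinct keys
-- (a Python dict can never hold duplicate keys, so this excludes no actual input of A).
def Pre_transform (tile : List (Int × Int × Bool)) (size : Int) (rot : Int) (flip : Int) : Prop :=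
  (tile.map (fun p => (p.1, p.2.1))).Nodup
instance (tile : List (Int × Int × Bool)) (size : Int) (rot : Int) (flip : Int) : Decidable (Pre_transform tile size rot flip) := by unfold Pre_transform; infer_instance

def pvWitness_transform : (List (Int × Int × Bool)) × Int × Int × Int :=
  ([(0, 0, true), (0, 1, false), (1, 0, true)], 2, 1, 3)

def Spec_transform (tile : List (Int × Int × Bool)) (size : Int) (rot : Int) (flip : Int) (out : List (Int × Int × Bool)) : Prop := out = transform_alt tile size rot flip
instance (tile : List (Int × Int × Bool)) (size : Int) (rot : Int) (flip : Int) (out : List (Int × Int × Bool)) : Decidable (Spec_transform tile size rot flip out) := by unfold Spec_transform; infer_instance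

-- ===== CLAIM (what is proved, stated in full; the proofs are below) =====
def Claim_equal_transform : Prop := ∀ (tile : List (Int × Int × Bool)) (size : Int) (rot : Int) (flip : Int), Dom_transform tile size rot flip → Pre_transform tile size rot flip → Spec_transform tile size rot flip (transform tile size rot flip)

-- ===== LEMMAS AND PROOFS =====

theorem pv_foldl_const_iterate {α β : Type} (l : List α) (f : β → β) (init : β) :
    l.foldl (fun acc _ => f acc) init = f^[l.length] init := by
  induction l generalizing init with
  | nil => rfl
  | cons a l ih => simp [List.foldl, ih, Function.iterate_succ_apply]

theorem pv_iterate_map {α : Type} (g : α → α) (n : Nat) (l : List α) :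
    (List.map g)^[n] l = l.map (g^[n]) := by
  induction n generalizing l with
  | zero => simp
  | succ n ih =>
      rw [Function.iterate_succ_apply, ih, List.map_map, ← Function.iterate_succ g n]

theorem pvRotPt_four (size : Int) (p : Int × Int × Bool) : (pvRotPt size)^[4] p = p := by
  obtain ⟨x, y, sq⟩ := p
  show pvRotPt size (pvRotPt size (pvRotPt size (pvRotPt size (x, y, sq)))) = (x, y, sq)
  simp [pvRotPt]

theorem pvRotPt_mul_four (size : Int) (k : Nat) (p : Int × Int × Bool) :
    (pvRotPt size)^[4 * k] p = p := by
  induction k generalizing p with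
  | zero => rfl
  | succ k ih =>
      have : 4 * (k + 1) = 4 * k + 4 := by ring
      rw [this, Function.iterate_add_apply, pvRotPt_four, ih]

theorem pvRotPt_mod_four (size : Int) (n : Nat) (p : Int × Int × Bool) :
    (pvRotPt size)^[n] p = (pvRotPt size)^[n % 4] p := by
  conv_lhs => rw [← Nat.div_add_mod n 4, Function.iterate_add_apply, pvRotPt_mul_four]

theorem pv_r_eq (rot : Int) : PySem.Int.mod (max rot 0) 4 = ((rot.toNat % 4 : Nat) : Int) := by
  rcases le_or_gt rot 0 with h | h
  · have h1 : max rot 0 = 0 := by omega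
    have h2 : rot.toNat = 0 := by omega
    rw [h1, h2]; decide
  · have h1 : max rot 0 = ((rot.toNat : Nat) : Int) := by omega
    rw [h1]
    exact_mod_cast PySem.Int.mod_natCast rot.toNat 4

theorem pv_rot_closed (size rot : Int) (p : Int × Int × Bool) :
    (pvRotPt size)^[rot.toNat] p =
      (let r := PySem.Int.mod (max rot 0) 4
       if r = 1 then (p.2.1, size - 1 - p.1, p.2.2)
       else if r = 2 then (size - 1 - p.1, size - 1 - p.2.1, p.2.2)
       else if r = 3 then (size - 1 - p.2.1, p.1, p.2.2)
       else p) := by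
  rw [pvRotPt_mod_four, pv_r_eq]
  obtain ⟨x, y, sq⟩ := p
  have hk : rot.toNat % 4 < 4 := Nat.mod_lt _ (by norm_num)
  set k := rot.toNat % 4 with hkdef
  interval_cases k <;> simp [Function.iterate_succ_apply, pvRotPt]

theorem transform_eq (tile : List (Int × Int × Bool)) (size rot flip : Int) :
    transform tile size rot flip = transform_alt tile size rot flip := by
  unfold transform transform_alt
  rw [pv_foldl_const_iterate, PySem.List.length_pyRange_one, pv_iterate_map]
  simp only [sub_zero]
  by_cases h1 : flip = 1 ∨ flip = 3 <;> by_cases h2 : flip = 2 ∨ flip = 3 <;>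
    simp only [h1, h2, if_pos, if_neg, not_false_iff, List.map_map] <;>
    · refine List.map_congr_left (fun p _ => ?_)
      simp only [Function.comp_apply, pv_rot_closed]
      obtain ⟨x, y, sq⟩ := p
      split_ifs <;> rfl

-- ===== VERDICT (by name: the statement is the Claim_ definition above) =====
theorem transform_spec : Claim_equal_transform := by
  intro tile size rot flip _ _
  unfold Spec_transform
  exact transform_eq tile size rot flip
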